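-- pv_equiv track=rewrite | github.com/Nonac/CS_2019_UoB | old/test.py | conutEdgesInLocal
-- ===== SOURCE A (Python) =====
-- def conutEdgesInLocal(edges):
--     local = []
--     for i in range(len(edges) + 1):
--         cnt = 0
--         if i > 0:
--             for each in edges[i - 1]:
--                 if each == 1:
--                     cnt += 1
--         if i < (len(edges) + 1):
--             for group in edges:
--                 if len(group) > i:
--                     if group[i] == 1:
--                         cnt += 1
--         # father to child edge
--         cnt += 1
--         local.append(cnt)
--     return local
-- ===== SOURCE B (Python) =====
-- def conutEdgesInLocal(edges):
--     # One pass over the data: per-row 1-counts and a dict of per-column 1-counts,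
--     # then assemble the answer from the two tables.
--     n = len(edges)
--     col = {}
--     rows = []
--     for group in edges:
--         ones = [j for j, v in enumerate(group) if v == 1]
--         rows.append(len(ones))
--         for j in ones:
--             col[j] = col.get(j, 0) + 1
--     return [(rows[i - 1] if i > 0 else 0) + col.get(i, 0) + 1 for i in range(n + 1)]
-- ===== Notes on version B (the rewrite author's own statement) =====
-- stated objective: faster
-- what changed: Instead of rescanning the whole structure for every index i (row i-1 plus a full column scan over all groups), B makes one pass over the groups building per-row 1-counts and a dict of per-column 1-counts, then assembles the n+1 results from these tables.
import Mathlib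
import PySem

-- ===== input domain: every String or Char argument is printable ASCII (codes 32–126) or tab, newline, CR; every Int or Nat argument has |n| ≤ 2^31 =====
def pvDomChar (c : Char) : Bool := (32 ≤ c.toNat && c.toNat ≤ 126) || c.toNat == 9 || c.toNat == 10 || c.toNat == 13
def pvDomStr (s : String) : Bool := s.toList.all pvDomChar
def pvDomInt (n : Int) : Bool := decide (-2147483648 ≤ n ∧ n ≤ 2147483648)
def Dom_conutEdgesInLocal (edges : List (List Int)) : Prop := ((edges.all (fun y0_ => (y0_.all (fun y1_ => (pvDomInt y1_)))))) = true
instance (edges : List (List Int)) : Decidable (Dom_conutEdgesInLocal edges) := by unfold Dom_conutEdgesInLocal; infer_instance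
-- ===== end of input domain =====

-- B replaces A's per-index rescans of the whole structure by one pass building row
-- 1-counts and a column-count dict, then assembles the result (objective: faster).

-- ===== PORT A =====
-- literal transliteration of A: for each i in range(len(edges)+1), rescan row i-1
-- and the i-th column of every group.  'edges[i-1]' / 'group[i]' are ported with
-- pyGetD; both indexings are guarded in range by A's own loop/if, so this is exact.
def conutEdgesInLocal (edges : List (List Int)) : List Int :=
  (PySem.List.pyRange 0 ((edges.length : Int) + 1) 1).foldl
    (fun local_ i =>
      local_ ++
        [(if i < (edges.length : Int) + 1 then
            edges.foldl
              (fun c group =>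
                if (group.length : Int) > i then
                  if PySem.List.pyGetD group i 0 == 1 then c + 1 else c
                else c)
              (if i > 0 then
                (PySem.List.pyGetD edges (i - 1) []).foldl
                  (fun c each => if each == 1 then c + 1 else c) 0
              else 0)
          else
            (if i > 0 then
              (PySem.List.pyGetD edges (i - 1) []).foldl
                (fun c each => if each == 1 then c + 1 else c) 0
            else 0)) + 1])
    []

-- ===== PORT B =====
-- B-side helper: 'ones = [j for j, v in enumerate(group) if v == 1]'
def pvOnes (g : List Int) : List Int :=
  ((PySem.List.enumerate g 0).filter (fun p => p.2 == 1)).map (·.1)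

def conutEdgesInLocal_alt (edges : List (List Int)) : List Int :=
  let cr : PySem.Dict Int Int × List Int :=
    edges.foldl
      (fun s group =>
        ((pvOnes group).foldl (fun d j => d.modify j 0 (· + 1)) s.1,
         s.2 ++ [((pvOnes group).length : Int)]))
      (PySem.Dict.empty, [])
  (PySem.List.pyRange 0 ((edges.length : Int) + 1) 1).map
    (fun i =>
      (if i > 0 then PySem.List.pyGetD cr.2 (i - 1) 0 else 0) + cr.1.getD i 0 + 1)

-- ===== PRECONDITION & SPEC =====
def Spec_conutEdgesInLocal (edges : List (List Int)) (out : List Int) : Prop := out = conutEdgesInLocal_alt edges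
instance (edges : List (List Int)) (out : List Int) : Decidable (Spec_conutEdgesInLocal edges out) := by unfold Spec_conutEdgesInLocal; infer_instance

-- ===== CLAIM (what is proved, stated in full; the proofs are below) =====
def Claim_equal_conutEdgesInLocal : Prop := ∀ (edges : List (List Int)), Dom_conutEdgesInLocal edges → Spec_conutEdgesInLocal edges (conutEdgesInLocal edges)

-- ===== LEMMAS AND PROOFS =====

-- the Bool column predicate 'len(group) > i and group[i] == 1'
def pvColP (i : Int) (g : List Int) : Bool :=
  decide ((g.length : Int) > i) && (PySem.List.pyGetD g i 0 == 1)

lemma pvOnes_nodup (g : List Int) : (pvOnes g).Nodup := by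
  unfold pvOnes
  have h := PySem.List.pairwise_lt_enumerate (xs := g) (s := 0)
  have h2 := (h.sublist (List.filter_sublist (l := PySem.List.enumerate g 0)
      (p := fun p => p.2 == 1))).map (f := (·.1)) (by intro a b hab; exact hab)
  exact h2.imp ne_of_lt

lemma mem_pvOnes (g : List Int) (i : Int) :
    i ∈ pvOnes g ↔ (0 ≤ i ∧ i < (g.length : Int) ∧ PySem.List.pyGetD g i 0 = 1) := by
  unfold pvOnes
  simp only [List.mem_map, List.mem_filter, PySem.List.mem_enumerate_iff]
  constructor
  · rintro ⟨⟨j, w⟩, ⟨⟨k, hk, hp⟩, hone⟩, rfl⟩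
    cases hp
    simp only [beq_iff_eq] at hone
    refine ⟨by simp, by simp; exact_mod_cast hk, ?_⟩
    simp only [zero_add]
    rw [PySem.List.pyGetD_natCast]
    simp [hk, hone]
  · rintro ⟨h0, hlt, heq⟩
    refine ⟨(i, 1), ⟨⟨i.toNat, by omega, ?_⟩, by simp⟩, rfl⟩
    rw [PySem.List.pyGetD_of_nonneg _ _ h0] at heq
    have hk : i.toNat < g.length := by omega
    simp [hk] at heq
    simp [heq]
    omega

lemma pvOnes_count (g : List Int) (i : Int) (hi : 0 ≤ i) :
    ((pvOnes g).count i : Int) = if pvColP i g then 1 else 0 := by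
  by_cases h : i ∈ pvOnes g
  · rw [List.count_eq_one_of_mem (pvOnes_nodup g) h]
    rw [mem_pvOnes] at h
    simp [pvColP, h.2.1, h.2.2]
  · rw [List.count_eq_zero_of_not_mem h]
    rw [mem_pvOnes] at h
    push Not at h
    rcases lt_or_ge i (g.length : Int) with hlt | hge
    · have := h hi hlt
      simp [pvColP, hlt, this]
    · simp [pvColP]
      intro hc
      omega

lemma pvOnes_length (g : List Int) : ((pvOnes g).length : Int) = (g.count 1 : Int) := by
  unfold pvOnes
  rw [List.length_map, ← List.countP_eq_length_filter]
  norm_cast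
  rw [List.count]
  conv_rhs => rw [← PySem.List.map_snd_enumerate g 0]
  rw [List.countP_map]
  rfl

lemma colFold_getD (edges : List (List Int)) (d : PySem.Dict Int Int) (i : Int) :
    (edges.foldl (fun d g => (pvOnes g).foldl (fun d j => d.modify j 0 (· + 1)) d) d).getD i 0
      = d.getD i 0 + (edges.map (fun g => ((pvOnes g).count i : Int))).sum := by
  induction edges generalizing d with
  | nil => simp
  | cons g t ih =>
    simp only [List.foldl_cons, List.map_cons, List.sum_cons]
    rw [ih, PySem.Dict.getD_foldl_modify_add_one]
    ring

-- A's column fold counts the groups satisfying pvColP i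
lemma colA (edges : List (List Int)) (i : Int) (c : Int) :
    edges.foldl
        (fun c group =>
          if (group.length : Int) > i then
            if PySem.List.pyGetD group i 0 == 1 then c + 1 else c
          else c) c
      = c + (edges.countP (pvColP i) : Int) := by
  induction edges generalizing c with
  | nil => simp
  | cons g t ih =>
    simp only [List.foldl_cons]
    rw [ih]
    unfold pvColP
    by_cases h1 : (g.length : Int) > i <;>
      by_cases h2 : PySem.List.pyGetD g i 0 == 1 <;>
        simp [h1, h2] <;> ring

-- B's single fold with the pair accumulator (col, rows) is the pair of its two folds
lemma pvSplit (edges : List (List Int)) (d : PySem.Dict Int Int) (rs : List Int) :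
    edges.foldl
        (fun s group =>
          ((pvOnes group).foldl (fun d j => d.modify j 0 (· + 1)) s.1,
           s.2 ++ [((pvOnes group).length : Int)]))
        (d, rs)
      = (edges.foldl (fun d group => (pvOnes group).foldl (fun d j => d.modify j 0 (· + 1)) d) d,
         edges.foldl (fun rs group => rs ++ [((pvOnes group).length : Int)]) rs) := by
  induction edges generalizing d rs with
  | nil => rfl
  | cons g t ih => simp only [List.foldl_cons]; exact ih _ _

-- ===== VERDICT (by name: the statement is the Claim_ definition above) =====
theorem conutEdgesInLocal_spec : Claim_equal_conutEdgesInLocal := by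
  intro edges _hdom
  unfold Spec_conutEdgesInLocal
  simp only [conutEdgesInLocal, conutEdgesInLocal_alt]
  rw [PySem.List.foldl_append_singleton_eq_map, List.nil_append]
  simp only [pvSplit]
  refine List.map_congr_left ?_
  intro i hi
  rw [PySem.List.mem_pyRange_one] at hi
  obtain ⟨h0, hlt⟩ := hi
  rw [if_pos hlt]
  -- the column fold of A counts the groups satisfying pvColP i
  rw [colA]
  -- the column dict of B counts the same groups
  rw [colFold_getD]
  have hdict : (PySem.Dict.empty : PySem.Dict Int Int).getD i 0 = 0 := rfl
  rw [hdict, zero_add]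
  rw [List.map_congr_left (fun g _hg => pvOnes_count g i h0),
      PySem.List.sum_map_ite_one_zero]
  -- the row part
  rw [PySem.List.foldl_append_singleton_eq_map, List.nil_append]
  by_cases hpos : i > 0
  · rw [if_pos hpos, if_pos hpos, PySem.List.foldl_beq_add_one, zero_add]
    have hb0 : (0:Int) ≤ i - 1 := by omega
    have hb1 : i - 1 < (edges.length : Int) := by
      have : ((edges.map (fun g => ((pvOnes g).length : Int))).length : Int)
          = (edges.length : Int) := by simp
      omega
    rw [PySem.List.pyGetD_eq_getElem edges [] hb0 hb1,
        PySem.List.pyGetD_eq_getElem (edges.map fun group => ((pvOnes group).length : Int)) 0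
          hb0 (by simpa using hb1)]
    rw [List.getElem_map, pvOnes_length]
  · rw [if_neg hpos, if_neg hpos]
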